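-- pv_equiv track=rewrite | github.com/geonheo/InspectorGadget | InspectorG/feature_generation.py | filter_patdict
-- ===== SOURCE A (Python) =====
-- def filter_patdict(patdic, devdict):
--     tmp = dict()
--     for pid, label in devdict.items():
--         if label == 1:
--             for k, v in patdic.items():
--                 if pid in k:
--                     tmp[k] = v
--     return tmp
-- ===== SOURCE B (Python) =====
-- def _first_match(pids, k):
--     i = 0
--     for p in pids:
--         if p in k:
--             return i
--         i += 1
--     return None
--
--
-- def filter_patdict(patdic, devdict):
--     pids = [pid for pid, label in devdict.items() if label == 1]
--     buckets = [[] for _ in pids]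
--     for k, v in patdic.items():
--         i = _first_match(pids, k)
--         if i is not None:
--             buckets[i].append((k, v))
--     out = dict()
--     for bucket in buckets:
--         for k, v in bucket:
--             out[k] = v
--     return out
-- ===== Notes on version B (the rewrite author's own statement) =====
-- stated objective: alternative
-- what changed: A rescans all of patdic once per label-1 pid and deduplicates via dict-overwrite; B makes a single pass over patdic, finds each key's first matching pid with an early-exit scan, buckets the entry under that pid's index, and concatenates the buckets.
import Mathlib
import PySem

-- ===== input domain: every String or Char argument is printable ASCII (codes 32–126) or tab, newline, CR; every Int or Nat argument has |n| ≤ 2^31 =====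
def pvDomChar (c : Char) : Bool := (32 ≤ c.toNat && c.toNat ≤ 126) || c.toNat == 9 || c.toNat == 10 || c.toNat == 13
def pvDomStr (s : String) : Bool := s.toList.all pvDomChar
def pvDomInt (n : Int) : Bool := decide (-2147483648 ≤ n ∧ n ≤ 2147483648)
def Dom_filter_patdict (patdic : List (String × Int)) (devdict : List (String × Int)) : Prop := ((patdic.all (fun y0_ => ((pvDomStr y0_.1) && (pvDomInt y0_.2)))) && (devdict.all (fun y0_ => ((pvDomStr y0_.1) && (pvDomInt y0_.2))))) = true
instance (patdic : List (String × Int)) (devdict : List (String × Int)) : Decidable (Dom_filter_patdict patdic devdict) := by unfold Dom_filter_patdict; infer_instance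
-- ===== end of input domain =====

-- B replaces A's per-pid rescans of patdic (with dict-overwrite dedup) by one scan of patdic
-- that assigns each key its first matching pid via an early-exit scan, bucketing by that pid;
-- objective: alternative (early exit per key instead of all pid×key substring checks).

-- ===== PORT A =====
def filter_patdict (patdic : List (String × Int)) (devdict : List (String × Int)) : List (String × Int) :=
  let patD := PySem.Dict.ofList patdic
  let devD := PySem.Dict.ofList devdict
  (devD.items.foldl
    (fun tmp pl =>
      if pl.2 == 1 then
        patD.items.foldl
          (fun tmp kv => if PySem.Str.isIn pl.1 kv.1 then tmp.insert kv.1 kv.2 else tmp) tmp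
      else tmp)
    PySem.Dict.empty).items

-- ===== PORT B =====
-- _first_match: index of the first pid contained in k (early exit), None if no pid matches
def firstMatch (pids : List String) (k : String) (i : Nat) : Option Nat :=
  match pids with
  | [] => none
  | p :: rest => if PySem.Str.isIn p k then some i else firstMatch rest k (i + 1)

def filter_patdict_alt (patdic : List (String × Int)) (devdict : List (String × Int)) : List (String × Int) :=
  let patD := PySem.Dict.ofList patdic
  let devD := PySem.Dict.ofList devdict
  let pids := (devD.items.filter (fun pl => pl.2 == 1)).map (fun pl => pl.1)
  let buckets0 := pids.map (fun _ => ([] : List (String × Int)))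
  let buckets := patD.items.foldl
    (fun bs kv =>
      match firstMatch pids kv.1 0 with
      | some i => bs.set i (bs.getD i [] ++ [kv])
      | none => bs)
    buckets0
  (buckets.foldl
    (fun d b => b.foldl (fun d kv => d.insert kv.1 kv.2) d)
    PySem.Dict.empty).items

-- ===== PRECONDITION & SPEC =====
def Spec_filter_patdict (patdic : List (String × Int)) (devdict : List (String × Int)) (out : List (String × Int)) : Prop := out = filter_patdict_alt patdic devdict
instance (patdic : List (String × Int)) (devdict : List (String × Int)) (out : List (String × Int)) : Decidable (Spec_filter_patdict patdic devdict out) := by unfold Spec_filter_patdict; infer_instance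

-- ===== CLAIM (what is proved, stated in full; the proofs are below) =====
def Claim_equal_filter_patdict : Prop := ∀ (patdic : List (String × Int)) (devdict : List (String × Int)), Dom_filter_patdict patdic devdict → Spec_filter_patdict patdic devdict (filter_patdict patdic devdict)



-- ===== LEMMAS AND PROOFS =====

-- the entries of patdic assigned to pid index j (first matching pid)
def bucket (P : List (String × Int)) (Q : List String) (j : Nat) : List (String × Int) :=
  P.filter (fun kv => decide (firstMatch Q kv.1 0 = some j))

lemma fm_shift (Q : List String) (k : String) : ∀ i : Nat, firstMatch Q k i = (firstMatch Q k 0).map (· + i) := by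
  induction Q with
  | nil => intro i; simp [firstMatch]
  | cons p rest ih =>
    intro i
    simp only [firstMatch]
    cases h : PySem.Str.isIn p k
    · simp only [Bool.false_eq_true, if_false]
      rw [ih (i+1), ih 1]
      cases firstMatch rest k 0 <;> simp <;> omega
    · simp

lemma fm_some_lt (Q : List String) (k : String) : ∀ {t : Nat}, firstMatch Q k 0 = some t → t < Q.length := by
  induction Q with
  | nil => intro t h; simp [firstMatch] at h
  | cons p rest ih =>
    intro t h
    simp only [firstMatch] at h
    cases hp : PySem.Str.isIn p k
    · rw [hp] at h
      simp only [Bool.false_eq_true, if_false] at h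
      rw [fm_shift] at h
      rcases hfm : firstMatch rest k 0 with _ | r
      · rw [hfm] at h; simp at h
      · rw [hfm] at h; simp at h
        have := ih hfm
        simp; omega
    · rw [hp] at h
      simp at h
      simp [← h]
lemma fm_append (Q₁ Q₂ : List String) (k : String) :
    firstMatch (Q₁ ++ Q₂) k 0 =
      match firstMatch Q₁ k 0 with
      | some j => some j
      | none => (firstMatch Q₂ k 0).map (· + Q₁.length) := by
  induction Q₁ with
  | nil => simp [firstMatch]
  | cons p rest ih =>
    simp only [List.cons_append, firstMatch]
    cases hp : PySem.Str.isIn p k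
    · simp only [Bool.false_eq_true, if_false]
      rw [fm_shift (rest ++ Q₂) k 1, fm_shift rest k 1, ih]
      cases firstMatch rest k 0 <;> cases firstMatch Q₂ k 0 <;> simp <;> omega
    · simp

lemma key_eq_of_nodup (P : List (String × Int)) (hP : (P.map Prod.fst).Nodup)
    {p kv : String × Int} (hp : p ∈ P) (hkv : kv ∈ P) (h : p.1 = kv.1) : p = kv :=
  List.inj_on_of_nodup_map hP hp hkv h

lemma insert_items_of_not_mem (d : PySem.Dict String Int) (k : String) (v : Int)
    (hc : d.contains k = false) : (d.insert k v).items = d.items ++ [(k, v)] := by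
  simp [PySem.Dict.insert, hc]

lemma insert_eq_of_mem (d : PySem.Dict String Int) (kv : String × Int)
    (hc : d.contains kv.1 = true) (h : ∀ p ∈ d.items, p.1 = kv.1 → p = kv) :
    d.insert kv.1 kv.2 = d := by
  apply PySem.Dict.ext
  simp only [PySem.Dict.insert, hc, if_true]
  show List.map _ d.items = d.items
  rw [List.map_congr_left (g := id), List.map_id]
  intro p hp
  by_cases hpk : p.1 = kv.1
  · have hpe := h p hp hpk
    simp [hpe]
  · simp [hpk]

lemma innerA (q : String) : ∀ (P' : List (String × Int)) (d : PySem.Dict String Int),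
    (P'.map Prod.fst).Nodup →
    (∀ kv ∈ P', ∀ p ∈ d.items, p.1 = kv.1 → p = kv) →
    (P'.foldl (fun tmp kv => if PySem.Str.isIn q kv.1 then tmp.insert kv.1 kv.2 else tmp) d).items
      = d.items ++ P'.filter (fun kv => PySem.Str.isIn q kv.1 && !(d.contains kv.1)) := by
  intro P'
  induction P' with
  | nil => intro d _ _; simp
  | cons kv P' ih =>
    intro d hnd h
    rw [List.map_cons, List.nodup_cons] at hnd
    have hndt : (P'.map Prod.fst).Nodup := hnd.2
    cases hq : PySem.Str.isIn q kv.1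
    · simp only [List.foldl_cons, hq, Bool.false_eq_true, if_false]
      rw [ih d hndt (fun kv' h' => h kv' (by simp [h']))]
      simp only [List.filter_cons, hq, Bool.false_and]
      rfl
    · cases hc : d.contains kv.1
      · have hitems : (d.insert kv.1 kv.2).items = d.items ++ [kv] := by
          rw [insert_items_of_not_mem d kv.1 kv.2 hc]
        have hcont : ∀ x : String, (d.insert kv.1 kv.2).contains x = (d.contains x || (kv.1 == x)) := by
          intro x
          simp [PySem.Dict.contains, hitems]
        have hkey : ∀ kv' ∈ P', kv.1 ≠ kv'.1 := by
          intro kv' h' he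
          exact hnd.1 (he ▸ List.mem_map_of_mem h')
        simp only [List.foldl_cons, hq, if_true]
        rw [ih (d.insert kv.1 kv.2) hndt ?_]
        · rw [hitems]
          rw [List.filter_congr (q := fun kv' => PySem.Str.isIn q kv'.1 && !(d.contains kv'.1))
              (fun kv' h' => by
                rw [hcont kv'.1]
                have hb : (kv.1 == kv'.1) = false := by
                  simp only [beq_eq_false_iff_ne, ne_eq]
                  exact hkey kv' h'
                rw [hb, Bool.or_false])]
          simp only [List.filter_cons, hq, hc, Bool.not_false, Bool.and_true, if_true,
            List.append_assoc]
          rfl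
        · intro kv' h' p hp hpk
          rw [hitems] at hp
          rcases List.mem_append.mp hp with hp | hp
          · exact h kv' (by simp [h']) p hp hpk
          · simp at hp
            exact absurd (hp ▸ hpk : kv.1 = kv'.1) (hkey kv' h')
      · have heq : d.insert kv.1 kv.2 = d :=
          insert_eq_of_mem d kv hc (h kv (by simp))
        simp only [List.foldl_cons, hq, if_true, heq]
        rw [ih d hndt (fun kv' h' => h kv' (by simp [h']))]
        simp only [List.filter_cons, hq, hc, Bool.not_true, Bool.and_false]
        rfl

lemma contains_flatMap (P : List (String × Int)) (Q : List String)
    (hP : (P.map Prod.fst).Nodup) (t : Nat) (kv : String × Int) (hkv : kv ∈ P)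
    (d : PySem.Dict String Int)
    (hd : d.items = (List.range t).flatMap (bucket P Q)) :
    d.contains kv.1 = true ↔ ∃ j, j < t ∧ firstMatch Q kv.1 0 = some j := by
  simp only [PySem.Dict.contains, hd, List.any_eq_true, List.mem_flatMap, List.mem_range,
    bucket, List.mem_filter, decide_eq_true_eq, beq_iff_eq]
  constructor
  · rintro ⟨p, ⟨j, hj, hpP, hfm⟩, hb⟩
    have : p = kv := key_eq_of_nodup P hP hpP hkv hb
    exact ⟨j, hj, this ▸ hfm⟩
  · rintro ⟨j, hj, hfm⟩
    exact ⟨kv, ⟨j, hj, hkv, hfm⟩, rfl⟩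

lemma step_filter_eq (P : List (String × Int)) (Q₁ : List String) (q : String) (Q₂ : List String)
    (hP : (P.map Prod.fst).Nodup) (d : PySem.Dict String Int)
    (hd : d.items = (List.range Q₁.length).flatMap (bucket P (Q₁ ++ q :: Q₂))) :
    P.filter (fun kv => PySem.Str.isIn q kv.1 && !(d.contains kv.1))
      = bucket P (Q₁ ++ q :: Q₂) Q₁.length := by
  apply List.filter_congr
  intro kv hkv
  have hcon := contains_flatMap P (Q₁ ++ q :: Q₂) hP Q₁.length kv hkv d hd
  have happ := fm_append Q₁ (q :: Q₂) kv.1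
  rcases hfm1 : firstMatch Q₁ kv.1 0 with _ | j
  · rw [hfm1] at happ
    simp only at happ
    cases hq : PySem.Str.isIn q kv.1
    · have hrk : firstMatch (Q₁ ++ q :: Q₂) kv.1 0 = (firstMatch Q₂ kv.1 0).map (· + (1 + Q₁.length)) := by
        rw [happ]
        simp only [firstMatch, hq, Bool.false_eq_true, if_false]
        rw [fm_shift Q₂ kv.1 1]
        cases firstMatch Q₂ kv.1 0 <;> simp <;> omega
      simp only [Bool.false_and]
      rcases hfm2 : firstMatch Q₂ kv.1 0 with _ | r
      · rw [hfm2] at hrk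
        simp only [Option.map_none] at hrk
        simp [hrk]
      · rw [hfm2] at hrk
        simp only [Option.map_some] at hrk
        simp only [hrk]
        have : ¬ (r + (1 + Q₁.length) = Q₁.length) := by omega
        simp [this]
    · have hrk : firstMatch (Q₁ ++ q :: Q₂) kv.1 0 = some Q₁.length := by
        rw [happ]
        simp only [firstMatch, hq, if_true, Option.map_some]
        simp
      have hcf : d.contains kv.1 = false := by
        rcases hcc : d.contains kv.1
        · rfl
        · exfalso
          rcases hcon.mp hcc with ⟨j, hj, hfm⟩
          rw [hrk] at hfm
          simp at hfm
          omega
      rw [hcf]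
      simp [hrk]
  · rw [hfm1] at happ
    simp only at happ
    have hj : j < Q₁.length := fm_some_lt Q₁ kv.1 hfm1
    have hct : d.contains kv.1 = true := hcon.mpr ⟨j, hj, happ⟩
    rw [hct]
    simp only [Bool.not_true, Bool.and_false]
    have : ¬ (j = Q₁.length) := by omega
    simp [happ, this]

lemma outerA (P : List (String × Int)) (Q : List String) (hP : (P.map Prod.fst).Nodup) :
    ∀ (Q₂ Q₁ : List String), Q = Q₁ ++ Q₂ → ∀ d : PySem.Dict String Int,
    d.items = (List.range Q₁.length).flatMap (bucket P Q) →
    (Q₂.foldl (fun tmp qq => P.foldl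
        (fun tmp kv => if PySem.Str.isIn qq kv.1 then tmp.insert kv.1 kv.2 else tmp) tmp) d).items
      = (List.range Q.length).flatMap (bucket P Q) := by
  intro Q₂
  induction Q₂ with
  | nil =>
    intro Q₁ hQ d hd
    simp only [List.foldl_nil]
    rw [hd, hQ]
    simp
  | cons q Q₂ ih =>
    intro Q₁ hQ d hd
    simp only [List.foldl_cons]
    apply ih (Q₁ ++ [q]) (by rw [hQ, List.append_assoc]; rfl)
    rw [innerA q P d hP ?_]
    · subst hQ
      rw [step_filter_eq P Q₁ q Q₂ hP d hd, hd]
      have : Q₁.length + 1 = (Q₁ ++ [q]).length := by simp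
      rw [← this, List.range_succ, List.flatMap_append]
      simp
    · intro kv hkv p hp hpk
      rw [hd] at hp
      simp only [List.mem_flatMap, bucket, List.mem_filter] at hp
      rcases hp with ⟨j, _, hpP, _⟩
      exact key_eq_of_nodup P hP hpP hkv hpk

lemma map_range_getD {α : Type} (bs : List α) (dflt : α) :
    (List.range bs.length).map (fun j => bs.getD j dflt) = bs := by
  apply List.ext_getElem
  · simp
  · intro i h1 h2
    simp only [List.getElem_map, List.getElem_range]
    rw [List.getD_eq_getElem?_getD, List.getElem?_eq_getElem h2]
    rfl

lemma bucketsB (Q : List String) : ∀ (P' : List (String × Int)) (bs : List (List (String × Int))),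
    bs.length = Q.length →
    P'.foldl (fun bs kv =>
        match firstMatch Q kv.1 0 with
        | some i => bs.set i (bs.getD i [] ++ [kv])
        | none => bs) bs
      = (List.range Q.length).map
          (fun j => bs.getD j [] ++ P'.filter (fun kv => decide (firstMatch Q kv.1 0 = some j))) := by
  intro P'
  induction P' with
  | nil =>
    intro bs hlen
    simp only [List.foldl_nil, List.filter_nil, List.append_nil]
    rw [← hlen, map_range_getD]
  | cons kv P' ih =>
    intro bs hlen
    rcases hfm : firstMatch Q kv.1 0 with _ | i
    · simp only [List.foldl_cons, hfm]
      rw [ih bs hlen]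
      apply List.map_congr_left
      intro j _
      simp [hfm]
    · have hi : i < Q.length := fm_some_lt Q kv.1 hfm
      have hib : i < bs.length := by omega
      simp only [List.foldl_cons, hfm]
      rw [ih (bs.set i (bs.getD i [] ++ [kv])) (by simp [hlen])]
      apply List.map_congr_left
      intro j hj
      rw [List.getD_eq_getElem?_getD (l := bs.set i (bs.getD i [] ++ [kv])), List.getElem?_set]
      by_cases hji : i = j
      · subst hji
        simp [hib, hfm, List.getD_eq_getElem?_getD]
      · simp only [hji, if_false]
        rw [← List.getD_eq_getElem?_getD]
        simp [hfm, hji]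

lemma insFold : ∀ (L : List (String × Int)) (d : PySem.Dict String Int),
    (L.map Prod.fst).Nodup → (∀ kv ∈ L, d.contains kv.1 = false) →
    (L.foldl (fun d kv => d.insert kv.1 kv.2) d).items = d.items ++ L := by
  intro L
  induction L with
  | nil => intro d _ _; simp
  | cons kv L ih =>
    intro d hnd hc
    rw [List.map_cons, List.nodup_cons] at hnd
    have hitems : (d.insert kv.1 kv.2).items = d.items ++ [kv] := by
      rw [insert_items_of_not_mem d kv.1 kv.2 (hc kv (by simp))]
    have hcont : ∀ x : String, (d.insert kv.1 kv.2).contains x = (d.contains x || (kv.1 == x)) := by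
      intro x
      simp [PySem.Dict.contains, hitems]
    simp only [List.foldl_cons]
    rw [ih (d.insert kv.1 kv.2) hnd.2 ?_]
    · rw [hitems, List.append_assoc]
      rfl
    · intro kv' h'
      have hkey : kv.1 ≠ kv'.1 := fun he => hnd.1 (he ▸ List.mem_map_of_mem h')
      rw [hcont kv'.1, hc kv' (by simp [h'])]
      simp [hkey]

lemma nodup_keys_flatMap (P : List (String × Int)) (Q : List String)
    (hP : (P.map Prod.fst).Nodup) :
    (((List.range Q.length).flatMap (bucket P Q)).map Prod.fst).Nodup := by
  rw [List.map_flatMap, List.nodup_flatMap]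
  constructor
  · intro j _
    exact hP.sublist (List.filter_sublist.map Prod.fst)
  · apply List.pairwise_lt_range.imp
    intro a b hab
    intro x hxa hxb
    simp only [bucket, List.mem_map, List.mem_filter, decide_eq_true_eq] at hxa hxb
    rcases hxa with ⟨p, ⟨_, hpa⟩, hpx⟩
    rcases hxb with ⟨p', ⟨_, hpb⟩, hpx'⟩
    rw [hpx] at hpa
    rw [hpx'] at hpb
    rw [hpa] at hpb
    simp at hpb
    omega

-- ===== VERDICT (by name: the statement is the Claim_ definition above) =====
theorem filter_patdict_spec : Claim_equal_filter_patdict := by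
  intro patdic devdict _
  unfold Spec_filter_patdict filter_patdict filter_patdict_alt
  simp only []
  set P := (PySem.Dict.ofList patdic).items with hPdef
  set Q := (((PySem.Dict.ofList devdict).items.filter (fun pl => pl.2 == 1)).map (fun pl => pl.1)) with hQdef
  have hP : (P.map Prod.fst).Nodup := by
    have := PySem.Dict.nodup_keys_ofList patdic
    simpa [PySem.Dict.keys] using this
  -- A side
  have hA : ((PySem.Dict.ofList devdict).items.foldl
      (fun tmp pl =>
        if pl.2 == 1 then
          P.foldl (fun tmp kv => if PySem.Str.isIn pl.1 kv.1 then tmp.insert kv.1 kv.2 else tmp) tmp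
        else tmp) PySem.Dict.empty).items
      = (List.range Q.length).flatMap (bucket P Q) := by
    rw [← List.foldl_filter,
      ← List.foldl_map (f := fun pl : String × Int => pl.1)
        (g := fun (tmp : PySem.Dict String Int) (q : String) => P.foldl
          (fun tmp kv => if PySem.Str.isIn q kv.1 then tmp.insert kv.1 kv.2 else tmp) tmp)]
    exact outerA P Q hP Q [] rfl PySem.Dict.empty (by simp [PySem.Dict.empty])
  -- B side
  have hB : ((((P.foldl (fun bs kv =>
          match firstMatch Q kv.1 0 with
          | some i => bs.set i (bs.getD i [] ++ [kv])
          | none => bs) (Q.map (fun _ => ([] : List (String × Int))))).foldl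
        (fun d b => b.foldl (fun d kv => d.insert kv.1 kv.2) d) PySem.Dict.empty)).items)
      = (List.range Q.length).flatMap (bucket P Q) := by
    rw [bucketsB Q P _ (by simp)]
    have hgd : ∀ j, ((Q.map (fun _ => ([] : List (String × Int)))).getD j []) = [] := by
      intro j
      rw [List.getD_eq_getElem?_getD]
      rcases h : (Q.map (fun _ => ([] : List (String × Int))))[j]? with _ | a
      · rfl
      · have := List.mem_of_getElem? h
        simp at this
        simp [this]
    have hmap : (List.range Q.length).map
        (fun j => ((Q.map (fun _ => ([] : List (String × Int)))).getD j []) ++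
          P.filter (fun kv => decide (firstMatch Q kv.1 0 = some j)))
        = (List.range Q.length).map (bucket P Q) := by
      apply List.map_congr_left
      intro j _
      rw [hgd j]
      rfl
    rw [hmap, ← List.foldl_flatten, ← List.flatMap_def]
    rw [insFold _ PySem.Dict.empty (nodup_keys_flatMap P Q hP) (fun kv _ => rfl)]
    rfl
  rw [hA, ← hB]
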